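-- pv_equiv track=rewrite | github.com/agarpe/neural-dynamics-utils | detection.py | detect_bursts_from_spikes
-- ===== SOURCE A (Python) =====
-- def detect_bursts_from_spikes(
--     spike_indices,
--     sampling_rate,  # Firing rate in Hz
--     min_spikes=3,
--     min_spike_dist=1,
--     max_spike_dist=20,
--     min_burst_dist=40
-- ):
--     """
--     Detect bursts from pre-detected spike indices based on spike distances and burst characteristics.
--
--     Parameters:
--     - spike_indices: List or array of spike indices (already detected spikes).
--     - firing_rate: Firing rate of the signal in Hz.
--     - min_spikes: Minimum number of spikes to consider a burst.
--     - min_spike_dist: Minimum distance (in ms) between spikes within a burst.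
--     - max_spike_dist: Maximum distance (in ms) between spikes within a burst.
--     - min_burst_dist: Minimum distance (in ms) between bursts.
--
--     Returns:
--     - bursts: List of bursts, each burst is a list of spike indices.
--     """
--     # Convert time in ms to "points" based on the firing rate
--     ms_to_points = lambda ms: int(ms / sampling_rate)
--
--     min_spike_dist = ms_to_points(min_spike_dist)
--     max_spike_dist = ms_to_points(max_spike_dist)
--     min_burst_dist = ms_to_points(min_burst_dist)
--
--
--     bursts = []  # List to store detected bursts
--     current_burst = []  # Temporary list for the current burst
--
--     # Step 1: Group spikes into bursts based on distance criteria
--     for i in range(1, len(spike_indices)):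
--         # Check the distance between consecutive spikes
--         spike_distance = spike_indices[i] - spike_indices[i - 1]
--
--         # If the distance is within the burst limits, add spike to the current burst
--         if min_spike_dist <= spike_distance <= max_spike_dist:
--             if not current_burst:
--                 current_burst.append(spike_indices[i - 1])  # Add the previous spike if starting a new burst
--             current_burst.append(spike_indices[i])
--
--         # If the distance exceeds the maximum allowed between spikes, finalize the current burst
--         else:
--             if len(current_burst) >= min_spikes:
--                 bursts.append(current_burst)
--             current_burst = [spike_indices[i]]  # Start a new burst
--
--     # Finalize the last burst if it meets the criteria
--     if len(current_burst) >= min_spikes: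
--         bursts.append(current_burst)
--
--     # Step 2: Filter bursts based on minimum distance between bursts
--     filtered_bursts = []
--     last_burst_end = -min_burst_dist  # Ensure the first burst starts at the beginning
--
--     for burst in bursts:
--         burst_start = burst[0]
--         burst_end = burst[-1]
--
--         # Ensure bursts are sufficiently far apart
--         if burst_start - last_burst_end >= min_burst_dist:
--             filtered_bursts.append(burst)
--             last_burst_end = burst_end  # Update the last burst end position
--
--     return filtered_bursts
-- ===== SOURCE B (Python) =====
-- def detect_bursts_from_spikes(
--     spike_indices,
--     sampling_rate,
--     min_spikes=3,
--     min_spike_dist=1,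
--     max_spike_dist=20,
--     min_burst_dist=40
-- ):
--     """Single-pass variant: bursts are finalized and distance-filtered inline,
--     never building the intermediate bursts list."""
--     lo = int(min_spike_dist / sampling_rate)
--     hi = int(max_spike_dist / sampling_rate)
--     gap = int(min_burst_dist / sampling_rate)
--
--     result = []
--     last_end = -gap
--     cur = []
--
--     def flush():
--         nonlocal last_end
--         if len(cur) >= min_spikes and cur[0] - last_end >= gap:
--             result.append(cur)
--             last_end = cur[-1]
--
--     prev = None
--     for s in spike_indices:
--         if prev is not None:
--             d = s - prev
--             if lo <= d <= hi:
--                 if not cur: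
--                     cur = [prev]
--                 cur.append(s)
--             else:
--                 flush()
--                 cur = [s]
--         prev = s
--     flush()
--     return result
-- ===== Notes on version B (the rewrite author's own statement) =====
-- stated objective: simpler
-- what changed: The two sequential passes (group spikes into a bursts list, then filter that list by inter-burst distance with a last_burst_end accumulator) are fused into one pass over the spikes that maintains the current burst, a prev spike and last_end, and a flush helper that accepts or drops a finished burst inline, so the intermediate bursts list is never built.
import Mathlib
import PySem

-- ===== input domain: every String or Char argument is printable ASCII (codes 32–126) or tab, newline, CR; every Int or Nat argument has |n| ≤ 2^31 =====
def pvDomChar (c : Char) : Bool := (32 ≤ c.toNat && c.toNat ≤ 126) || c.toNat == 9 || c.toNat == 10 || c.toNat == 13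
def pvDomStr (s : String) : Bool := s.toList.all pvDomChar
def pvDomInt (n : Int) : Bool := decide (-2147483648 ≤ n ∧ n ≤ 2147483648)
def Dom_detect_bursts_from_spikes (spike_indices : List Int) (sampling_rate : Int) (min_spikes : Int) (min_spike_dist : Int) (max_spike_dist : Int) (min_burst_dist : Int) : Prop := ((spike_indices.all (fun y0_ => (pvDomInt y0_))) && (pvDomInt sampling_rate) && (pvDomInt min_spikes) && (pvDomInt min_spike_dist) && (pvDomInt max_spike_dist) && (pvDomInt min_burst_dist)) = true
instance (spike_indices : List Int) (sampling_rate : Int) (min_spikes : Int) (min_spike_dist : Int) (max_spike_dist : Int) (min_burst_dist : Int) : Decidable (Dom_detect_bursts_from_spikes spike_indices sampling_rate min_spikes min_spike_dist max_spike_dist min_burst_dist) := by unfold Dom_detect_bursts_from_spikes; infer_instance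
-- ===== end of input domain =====

-- B fuses A's two passes (burst grouping, then distance filtering) into one loop over the
-- spikes with an inline flush helper; proved to return the same value wherever A returns.

-- ===== PORT A =====
-- int(ms / sampling_rate): CPython float division then int() truncation; for |ms|, |sr| ≤ 2^31
-- the float quotient never crosses an integer, so this equals exact truncation toward zero.
def pvMsToPoints (ms sr : Int) : Int := Int.tdiv ms sr

-- body of A's step-1 loop: state (bursts, current_burst), input the pair (spike[i-1], spike[i])
def pvStepA (lo hi mins : Int) (st : List (List Int) × List Int) (ps : Int × Int) :
    List (List Int) × List Int :=
  if lo ≤ ps.2 - ps.1 ∧ ps.2 - ps.1 ≤ hi then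
    (st.1, (if st.2.isEmpty then st.2 ++ [ps.1] else st.2) ++ [ps.2])
  else
    (if mins ≤ (st.2.length : Int) then st.1 ++ [st.2] else st.1, [ps.2])

-- body of A's step-2 loop: burst[0] / burst[-1] read with default 0 (empty bursts are outside Pre_)
def pvStepF (gap : Int) (st : List (List Int) × Int) (burst : List Int) :
    List (List Int) × Int :=
  if gap ≤ burst.headD 0 - st.2 then (st.1 ++ [burst], burst.getLastD 0) else st

def detect_bursts_from_spikes (spike_indices : List Int) (sampling_rate : Int) (min_spikes : Int) (min_spike_dist : Int) (max_spike_dist : Int) (min_burst_dist : Int) : List (List Int) :=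
  let lo := pvMsToPoints min_spike_dist sampling_rate
  let hi := pvMsToPoints max_spike_dist sampling_rate
  let gap := pvMsToPoints min_burst_dist sampling_rate
  -- for i in range(1, len): the iteration sees spike_indices[i-1], spike_indices[i]
  let s1 := (spike_indices.zip spike_indices.tail).foldl (pvStepA lo hi min_spikes) ([], [])
  let bursts := if min_spikes ≤ ((s1.2).length : Int) then s1.1 ++ [s1.2] else s1.1
  (bursts.foldl (pvStepF gap) ([], -gap)).1

-- ===== PORT B =====
-- B's flush(): accept cur if long enough and far enough from last_end (cur[0]/cur[-1] via default 0)
def pvFlushB (mins gap : Int) (st : List (List Int) × Int) (cur : List Int) :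
    List (List Int) × Int :=
  if mins ≤ (cur.length : Int) ∧ gap ≤ cur.headD 0 - st.2 then
    (st.1 ++ [cur], cur.getLastD 0)
  else st

-- body of B's single loop: state ((result, last_end), cur, prev)
def pvStepB (lo hi mins gap : Int)
    (st : (List (List Int) × Int) × List Int × Option Int) (s : Int) :
    (List (List Int) × Int) × List Int × Option Int :=
  match st.2.2 with
  | none => (st.1, st.2.1, some s)
  | some p =>
    if lo ≤ s - p ∧ s - p ≤ hi then
      (st.1, (if st.2.1.isEmpty then [p] else st.2.1) ++ [s], some s)
    else
      (pvFlushB mins gap st.1 st.2.1, [s], some s)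

def detect_bursts_from_spikes_alt (spike_indices : List Int) (sampling_rate : Int) (min_spikes : Int) (min_spike_dist : Int) (max_spike_dist : Int) (min_burst_dist : Int) : List (List Int) :=
  let lo := pvMsToPoints min_spike_dist sampling_rate
  let hi := pvMsToPoints max_spike_dist sampling_rate
  let gap := pvMsToPoints min_burst_dist sampling_rate
  let st := spike_indices.foldl (pvStepB lo hi min_spikes gap) ((([], -gap), [], none))
  (pvFlushB min_spikes gap st.1 st.2.1).1

-- ===== PRECONDITION & SPEC =====
-- Pre_ excludes exactly the inputs on which the Python A raises: sampling_rate = 0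
-- (ZeroDivisionError), and min_spikes ≤ 0 when the list has < 2 spikes or its first gap is
-- outside [lo, hi] — there A flushes an empty current_burst and raises IndexError on burst[0]
-- (B raises the same IndexError there).
def Pre_detect_bursts_from_spikes (spike_indices : List Int) (sampling_rate : Int) (min_spikes : Int) (min_spike_dist : Int) (max_spike_dist : Int) (min_burst_dist : Int) : Prop :=
  sampling_rate ≠ 0 ∧
  (1 ≤ min_spikes ∨
    (2 ≤ spike_indices.length ∧
      pvMsToPoints min_spike_dist sampling_rate ≤ spike_indices.getD 1 0 - spike_indices.getD 0 0 ∧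
      spike_indices.getD 1 0 - spike_indices.getD 0 0 ≤ pvMsToPoints max_spike_dist sampling_rate))
instance (spike_indices : List Int) (sampling_rate : Int) (min_spikes : Int) (min_spike_dist : Int) (max_spike_dist : Int) (min_burst_dist : Int) : Decidable (Pre_detect_bursts_from_spikes spike_indices sampling_rate min_spikes min_spike_dist max_spike_dist min_burst_dist) := by unfold Pre_detect_bursts_from_spikes; infer_instance

def pvWitness_detect_bursts_from_spikes : List Int × Int × Int × Int × Int × Int :=
  ([0, 5, 10, 100, 104, 109], 1, 3, 1, 20, 40)

-- ===== PRECONDITION & SPEC =====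
def Spec_detect_bursts_from_spikes (spike_indices : List Int) (sampling_rate : Int) (min_spikes : Int) (min_spike_dist : Int) (max_spike_dist : Int) (min_burst_dist : Int) (out : List (List Int)) : Prop := out = detect_bursts_from_spikes_alt spike_indices sampling_rate min_spikes min_spike_dist max_spike_dist min_burst_dist
instance (spike_indices : List Int) (sampling_rate : Int) (min_spikes : Int) (min_spike_dist : Int) (max_spike_dist : Int) (min_burst_dist : Int) (out : List (List Int)) : Decidable (Spec_detect_bursts_from_spikes spike_indices sampling_rate min_spikes min_spike_dist max_spike_dist min_burst_dist out) := by unfold Spec_detect_bursts_from_spikes; infer_instance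

-- ===== CLAIM (what is proved, stated in full; the proofs are below) =====
def Claim_equal_detect_bursts_from_spikes : Prop := ∀ (spike_indices : List Int) (sampling_rate : Int) (min_spikes : Int) (min_spike_dist : Int) (max_spike_dist : Int) (min_burst_dist : Int), Dom_detect_bursts_from_spikes spike_indices sampling_rate min_spikes min_spike_dist max_spike_dist min_burst_dist → Pre_detect_bursts_from_spikes spike_indices sampling_rate min_spikes min_spike_dist max_spike_dist min_burst_dist → Spec_detect_bursts_from_spikes spike_indices sampling_rate min_spikes min_spike_dist max_spike_dist min_burst_dist (detect_bursts_from_spikes spike_indices sampling_rate min_spikes min_spike_dist max_spike_dist min_burst_dist)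

-- ===== LEMMAS AND PROOFS =====
-- B's loop body once prev is set, viewed as a function of the pair (prev, s)
def pvStepBp (lo hi mins gap : Int)
    (st : (List (List Int) × Int) × List Int) (ps : Int × Int) :
    (List (List Int) × Int) × List Int :=
  if lo ≤ ps.2 - ps.1 ∧ ps.2 - ps.1 ≤ hi then
    (st.1, (if st.2.isEmpty then [ps.1] else st.2) ++ [ps.2])
  else
    (pvFlushB mins gap st.1 st.2, [ps.2])

lemma stepB_some (lo hi mins gap : Int) (fs : List (List Int) × Int) (cur : List Int)
    (p x : Int) :
    pvStepB lo hi mins gap (fs, cur, some p) x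
      = ((pvStepBp lo hi mins gap (fs, cur) (p, x)).1,
         (pvStepBp lo hi mins gap (fs, cur) (p, x)).2, some x) := by
  simp only [pvStepB, pvStepBp]
  split_ifs <;> rfl

lemma bfold_some (lo hi mins gap : Int) :
    ∀ (xs : List Int) (p : Int) (fs : List (List Int) × Int) (cur : List Int),
    List.foldl (pvStepB lo hi mins gap) (fs, cur, some p) xs
      = ((List.foldl (pvStepBp lo hi mins gap) (fs, cur) (List.zip (p :: xs) xs)).1,
         (List.foldl (pvStepBp lo hi mins gap) (fs, cur) (List.zip (p :: xs) xs)).2,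
         some (xs.getLastD p))
  | [], p, fs, cur => by simp
  | x :: xs, p, fs, cur => by
    have h := bfold_some lo hi mins gap xs x
        (pvStepBp lo hi mins gap (fs, cur) (p, x)).1
        (pvStepBp lo hi mins gap (fs, cur) (p, x)).2
    simp only [List.foldl, stepB_some, List.zip_cons_cons, List.getLastD_cons] at *
    exact h

lemma stepA_pre1 (lo hi mins : Int) (st : List (List Int) × List Int) (ps : Int × Int) :
    (pvStepA lo hi mins st ps).1 = st.1 ++ (pvStepA lo hi mins ([], st.2) ps).1 := by
  simp only [pvStepA]
  split_ifs <;> simp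

lemma stepA_pre2 (lo hi mins : Int) (st : List (List Int) × List Int) (ps : Int × Int) :
    (pvStepA lo hi mins st ps).2 = (pvStepA lo hi mins ([], st.2) ps).2 := by
  simp only [pvStepA]
  split_ifs <;> rfl

lemma afold_pre (lo hi mins : Int) :
    ∀ (l : List (Int × Int)) (st : List (List Int) × List Int),
    List.foldl (pvStepA lo hi mins) st l
      = (st.1 ++ (List.foldl (pvStepA lo hi mins) ([], st.2) l).1,
         (List.foldl (pvStepA lo hi mins) ([], st.2) l).2)
  | [], st => by simp
  | ps :: l, st => by
    rw [List.foldl_cons, List.foldl_cons,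
        afold_pre lo hi mins l (pvStepA lo hi mins st ps),
        afold_pre lo hi mins l (pvStepA lo hi mins ([], st.2) ps),
        stepA_pre1 lo hi mins st ps, stepA_pre2 lo hi mins st ps]
    simp [List.append_assoc]

lemma stepA_len (lo hi mins : Int) (c : List Int) (ps : Int × Int) :
    ∀ x ∈ (pvStepA lo hi mins ([], c) ps).1, mins ≤ (x.length : Int) := by
  simp only [pvStepA]
  split_ifs with h1 h2 <;> simp_all

lemma afold_len (lo hi mins : Int) :
    ∀ (l : List (Int × Int)) (c : List Int),
    ∀ x ∈ (List.foldl (pvStepA lo hi mins) ([], c) l).1, mins ≤ (x.length : Int)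
  | [], c => by simp
  | ps :: l, c => by
    intro x hx
    rw [List.foldl_cons, afold_pre lo hi mins l (pvStepA lo hi mins ([], c) ps)] at hx
    rcases List.mem_append.mp hx with hx | hx
    · exact stepA_len lo hi mins c ps x hx
    · exact afold_len lo hi mins l _ x hx

lemma foldF_eq_flush (mins gap : Int) :
    ∀ (bs : List (List Int)) (st : List (List Int) × Int),
    (∀ b ∈ bs, mins ≤ (b.length : Int)) →
    List.foldl (pvStepF gap) st bs = List.foldl (pvFlushB mins gap) st bs
  | [], _, _ => rfl
  | b :: bs, st, h => by
    have hb : mins ≤ (b.length : Int) := h b (by simp)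
    have hstep : pvStepF gap st b = pvFlushB mins gap st b := by
      simp [pvStepF, pvFlushB, hb]
    rw [List.foldl_cons, List.foldl_cons, hstep]
    exact foldF_eq_flush mins gap bs _ (fun x hx => h x (by simp [hx]))

lemma flush_short (mins gap : Int) (st : List (List Int) × Int) (c : List Int)
    (h : ¬ mins ≤ (c.length : Int)) : pvFlushB mins gap st c = st := by
  simp [pvFlushB, h]

lemma bp_eq (lo hi mins gap : Int) :
    ∀ (l : List (Int × Int)) (st : List (List Int) × Int) (c : List Int),
    List.foldl (pvStepBp lo hi mins gap) (st, c) l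
      = (List.foldl (pvFlushB mins gap) st (List.foldl (pvStepA lo hi mins) ([], c) l).1,
         (List.foldl (pvStepA lo hi mins) ([], c) l).2)
  | [], st, c => by simp
  | ps :: l, st, c => by
    rw [List.foldl_cons, List.foldl_cons]
    by_cases h1 : lo ≤ ps.2 - ps.1 ∧ ps.2 - ps.1 ≤ hi
    · -- in-range gap: both sides extend the same current burst
      have hB : pvStepBp lo hi mins gap (st, c) ps
          = (st, (if c.isEmpty then c ++ [ps.1] else c) ++ [ps.2]) := by
        simp only [pvStepBp, if_pos h1]
        by_cases he : c.isEmpty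
        · simp [List.isEmpty_iff.mp he]
        · simp [he]
      have hA : pvStepA lo hi mins ([], c) ps
          = ([], (if c.isEmpty then c ++ [ps.1] else c) ++ [ps.2]) := by
        simp only [pvStepA, if_pos h1]
      rw [hB, hA]
      exact bp_eq lo hi mins gap l st _
    · -- gap out of range: A queues the burst (if long enough), B flushes it now
      have hB : pvStepBp lo hi mins gap (st, c) ps = (pvFlushB mins gap st c, [ps.2]) := by
        simp only [pvStepBp, if_neg h1]
      have hA : pvStepA lo hi mins ([], c) ps
          = ((if mins ≤ (c.length : Int) then [c] else []), [ps.2]) := by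
        simp only [pvStepA, if_neg h1]
        split_ifs <;> rfl
      rw [hB, hA, bp_eq lo hi mins gap l (pvFlushB mins gap st c) [ps.2],
          afold_pre lo hi mins l ((if mins ≤ (c.length : Int) then [c] else []), [ps.2])]
      by_cases h2 : mins ≤ (c.length : Int)
      · simp [h2]
      · simp [h2, flush_short mins gap st c h2]

-- ===== VERDICT (by name: the statement is the Claim_ definition above) =====
theorem detect_bursts_from_spikes_spec : Claim_equal_detect_bursts_from_spikes := by
  intro xs sr mins msd xsd mbd _dom _pre
  unfold Spec_detect_bursts_from_spikes
  cases xs with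
  | nil =>
    by_cases h : mins ≤ (0 : Int)
    · simp [detect_bursts_from_spikes, detect_bursts_from_spikes_alt, h, pvStepF, pvFlushB]
    · simp [detect_bursts_from_spikes, detect_bursts_from_spikes_alt, h, pvFlushB]
  | cons x xs' =>
    simp only [detect_bursts_from_spikes, detect_bursts_from_spikes_alt,
      List.foldl_cons, List.tail_cons]
    have hfirst : pvStepB (pvMsToPoints msd sr) (pvMsToPoints xsd sr) mins
        (pvMsToPoints mbd sr) ((([], -(pvMsToPoints mbd sr)), [], none)) x
        = ((([], -(pvMsToPoints mbd sr))), [], some x) := rfl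
    rw [hfirst, bfold_some, bp_eq]
    set lo := pvMsToPoints msd sr
    set hi := pvMsToPoints xsd sr
    set gap := pvMsToPoints mbd sr
    set r := List.foldl (pvStepA lo hi mins) ([], []) (List.zip (x :: xs') xs') with hr
    have hlen : ∀ b ∈ r.1, mins ≤ (b.length : Int) :=
      afold_len lo hi mins _ []
    by_cases h2 : mins ≤ (r.2.length : Int)
    · have hlen2 : ∀ b ∈ r.1 ++ [r.2], mins ≤ (b.length : Int) := by
        intro b hb
        rcases List.mem_append.mp hb with hb | hb
        · exact hlen b hb
        · simp only [List.mem_singleton] at hb; subst hb; exact h2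
      rw [if_pos h2, foldF_eq_flush mins gap _ _ hlen2, List.foldl_append]
      simp
    · rw [if_neg h2, foldF_eq_flush mins gap _ _ hlen,
        flush_short mins gap _ _ h2]
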